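-- pv_equiv track=rewrite | github.com/BalaShankar9/hirestack-ai | ai_engine/agents/tools.py | _classify_requirements
-- ===== SOURCE A (Python) =====
-- def _classify_requirements(text: str, keywords: set[str]) -> tuple[set[str], set[str]]:
--     """Split keywords into must-have vs nice-to-have based on JD section headers."""
--     must_have: set[str] = set()
--     nice_to_have: set[str] = set()
--
--     lines = text.split("\n")
--     section = "must"  # Default section
--
--     for line in lines:
--         line_lower = line.lower().strip()
--         # Detect section headers
--         if any(h in line_lower for h in ("requirements", "must have", "required", "qualifications", "what you")):
--             section = "must"
--         elif any(h in line_lower for h in ("nice to have", "preferred", "bonus", "plus", "ideal")):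
--             section = "nice"
--
--         for kw in keywords:
--             if kw in line_lower:
--                 if section == "must":
--                     must_have.add(kw)
--                 else:
--                     nice_to_have.add(kw)
--
--     # Keywords not in any section default to must-have
--     unclassified = keywords - must_have - nice_to_have
--     must_have.update(unclassified)
--
--     return must_have, nice_to_have
-- ===== SOURCE B (Python) =====
-- def _classify_requirements(text: str, keywords: set[str]) -> tuple[set[str], set[str]]:
--     """Split keywords into must-have vs nice-to-have based on JD section headers."""
--     must_headers = ("requirements", "must have", "required", "qualifications", "what you")
--     nice_headers = ("nice to have", "preferred", "bonus", "plus", "ideal")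
--
--     # Phase 1: label every (lowercased, stripped) line with the section in force.
--     labeled = []
--     in_must = True
--     for raw in text.split("\n"):
--         line = raw.lower().strip()
--         if any(h in line for h in must_headers):
--             in_must = True
--         elif any(h in line for h in nice_headers):
--             in_must = False
--         labeled.append((line, in_must))
--
--     # Phase 2: derive both buckets from the labeled lines.
--     must = {kw for line, m in labeled if m for kw in keywords if kw in line}
--     nice = {kw for line, m in labeled if not m for kw in keywords if kw in line}
--     # Keywords never seen anywhere default to must-have.
--     must |= {kw for kw in keywords if kw not in must and kw not in nice}
--     return must, nice
-- ===== Notes on version B (the rewrite author's own statement) =====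
-- stated objective: alternative
-- what changed: A interleaves header detection, keyword matching and online mutation of two sets in one loop and patches in unclassified keywords by set difference; B is a two-phase pipeline that first labels every line with the section in force and then derives both buckets (and the unclassified default) by comprehensions over the labeled lines.
import Mathlib
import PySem

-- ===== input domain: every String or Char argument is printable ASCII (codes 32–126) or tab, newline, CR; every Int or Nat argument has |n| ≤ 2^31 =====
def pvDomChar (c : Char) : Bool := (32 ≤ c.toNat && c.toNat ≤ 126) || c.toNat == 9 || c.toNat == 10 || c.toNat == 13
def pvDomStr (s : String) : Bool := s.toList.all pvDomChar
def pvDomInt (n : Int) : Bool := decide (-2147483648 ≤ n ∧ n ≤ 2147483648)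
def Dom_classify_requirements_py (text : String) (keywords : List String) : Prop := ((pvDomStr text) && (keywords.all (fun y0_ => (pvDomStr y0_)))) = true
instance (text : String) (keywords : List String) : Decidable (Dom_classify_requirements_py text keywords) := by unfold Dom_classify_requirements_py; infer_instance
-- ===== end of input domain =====

-- B replaces A's single loop mutating two sets online by a two-phase pipeline
-- (label each line with its section, then derive the buckets by comprehensions);
-- alternative decomposition, same cost.


-- ===== PORT A =====
def pvMustHeaders : List String := ["requirements", "must have", "required", "qualifications", "what you"]
def pvNiceHeaders : List String := ["nice to have", "preferred", "bonus", "plus", "ideal"]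

-- section-header detection of A's loop
def pvASec (ll cur : String) : String :=
  if pvMustHeaders.any (fun h => PySem.Str.isIn h ll) then "must"
  else if pvNiceHeaders.any (fun h => PySem.Str.isIn h ll) then "nice"
  else cur

-- body of A's inner 'for kw in keywords' loop
def pvAKw (ll sec : String) (p : List String × List String) (kw : String) : List String × List String :=
  if PySem.Str.isIn kw ll then
    (if sec = "must" then (PySem.Set.add p.1 kw, p.2) else (p.1, PySem.Set.add p.2 kw))
  else p

-- body of A's 'for line in lines' loop over state (section, must_have, nice_to_have)
def pvAStep (keywords : List String) (st : String × List String × List String) (line : String) :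
    String × List String × List String :=
  let ll := PySem.Str.strip (PySem.Str.lower line)
  let sec := pvASec ll st.1
  let mn := keywords.foldl (pvAKw ll sec) (st.2.1, st.2.2)
  (sec, mn.1, mn.2)

-- A's epilogue: unclassified keywords default to must-have
def pvAFinish (keywords : List String) (res : String × List String × List String) :
    List String × List String :=
  (PySem.Set.update res.2.1
      (PySem.Set.diff (PySem.Set.diff (PySem.Set.ofList keywords) res.2.1) res.2.2),
   res.2.2)

def classify_requirements_py (text : String) (keywords : List String) : List String × List String :=
  pvAFinish keywords
    (((PySem.Str.split? text "\n").getD []).foldl (pvAStep keywords)   -- sep "\n" ≠ "": split? is always some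
      ("must", PySem.Set.empty, PySem.Set.empty))

-- ===== PORT B =====
-- Source B's section update for one (lowercased, stripped) line
def pvBSec (line : String) (inMust : Bool) : Bool :=
  if pvMustHeaders.any (fun h => PySem.Str.isIn h line) then true
  else if pvNiceHeaders.any (fun h => PySem.Str.isIn h line) then false
  else inMust

-- phase 1 of Source B: label every line with the section in force
def pvLabelLines : List String → Bool → List (String × Bool)
  | [], _ => []
  | raw :: rest, inMust =>
    let line := PySem.Str.strip (PySem.Str.lower raw)
    let b := pvBSec line inMust
    (line, b) :: pvLabelLines rest b

-- the two generators of Source B's set comprehensions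
def pvPickMust (keywords : List String) (p : String × Bool) : List String :=
  if p.2 then keywords.filter (fun kw => PySem.Str.isIn kw p.1) else []
def pvPickNice (keywords : List String) (p : String × Bool) : List String :=
  if !p.2 then keywords.filter (fun kw => PySem.Str.isIn kw p.1) else []

-- phase 2 of Source B: derive both buckets from the labeled lines
def pvBCombine (keywords : List String) (labeled : List (String × Bool)) :
    List String × List String :=
  let must := PySem.Set.ofList (labeled.flatMap (pvPickMust keywords))
  let nice := PySem.Set.ofList (labeled.flatMap (pvPickNice keywords))
  let extra := PySem.Set.ofList (keywords.filter (fun kw =>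
      !(PySem.Set.contains must kw) && !(PySem.Set.contains nice kw)))
  (PySem.Set.union must extra, nice)

def classify_requirements_py_alt (text : String) (keywords : List String) : List String × List String :=
  pvBCombine keywords (pvLabelLines ((PySem.Str.split? text "\n").getD []) true)

-- ===== PRECONDITION & SPEC =====
def Spec_classify_requirements_py (text : String) (keywords : List String) (out : List String × List String) : Prop := out = classify_requirements_py_alt text keywords
instance (text : String) (keywords : List String) (out : List String × List String) : Decidable (Spec_classify_requirements_py text keywords out) := by unfold Spec_classify_requirements_py; infer_instance

-- ===== CLAIM (what is proved, stated in full; the proofs are below) =====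
def Claim_equal_classify_requirements_py : Prop := ∀ (text : String) (keywords : List String), Dom_classify_requirements_py text keywords → Spec_classify_requirements_py text keywords (classify_requirements_py text keywords)

-- ===== LEMMAS AND PROOFS =====

-- A's inner keyword loop adds the line's matches to the bucket named by sec
theorem pvInnerFold (ll sec : String) (kws : List String) (m n : List String) :
    List.foldl (pvAKw ll sec) (m, n) kws
      = if sec = "must"
          then (List.foldl PySem.Set.add m (kws.filter (fun kw => PySem.Str.isIn kw ll)), n)
          else (m, List.foldl PySem.Set.add n (kws.filter (fun kw => PySem.Str.isIn kw ll))) := by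
  induction kws generalizing m n with
  | nil => by_cases h : sec = "must" <;> simp [h]
  | cons kw rest ih =>
    have hstep : pvAKw ll sec (m, n) kw
        = if PySem.Str.isIn kw ll = true then
            (if sec = "must" then (PySem.Set.add m kw, n) else (m, PySem.Set.add n kw))
          else (m, n) := rfl
    rw [List.foldl_cons, hstep, List.filter_cons]
    by_cases h1 : PySem.Str.isIn kw ll = true
    · simp only [if_pos h1]
      by_cases h2 : sec = "must"
      · simp only [if_pos h2, ih, List.foldl_cons]
      · simp only [if_neg h2, ih, List.foldl_cons]
    · simp only [if_neg h1, ih]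

-- A's line loop, started in section b, computes exactly B's two event streams
theorem pvOuterFold (keywords : List String) (lines : List String) (b : Bool)
    (m n : List String) :
    ∃ b' : Bool, lines.foldl (pvAStep keywords) ((if b then "must" else "nice"), m, n)
      = ((if b' then "must" else "nice"),
         List.foldl PySem.Set.add m ((pvLabelLines lines b).flatMap (pvPickMust keywords)),
         List.foldl PySem.Set.add n ((pvLabelLines lines b).flatMap (pvPickNice keywords))) := by
  induction lines generalizing b m n with
  | nil => exact ⟨b, by simp [pvLabelLines]⟩
  | cons line rest ih =>
    set ll := PySem.Str.strip (PySem.Str.lower line) with hll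
    have hlab : pvLabelLines (line :: rest) b
        = (ll, pvBSec ll b) :: pvLabelLines rest (pvBSec ll b) := rfl
    have hsec : pvASec ll (if b then "must" else "nice")
        = if pvBSec ll b then "must" else "nice" := by
      unfold pvASec pvBSec
      cases hA : (pvMustHeaders.any fun h => PySem.Str.isIn h ll) <;>
        cases hB : (pvNiceHeaders.any fun h => PySem.Str.isIn h ll) <;>
          cases b <;> rfl
    have hstep : pvAStep keywords ((if b then "must" else "nice"), m, n) line
        = ((if pvBSec ll b then "must" else "nice"),
           if pvBSec ll b
             then (List.foldl PySem.Set.add m (keywords.filter (fun kw => PySem.Str.isIn kw ll)), n)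
             else (m, List.foldl PySem.Set.add n (keywords.filter (fun kw => PySem.Str.isIn kw ll)))) := by
      show (pvASec ll (if b then "must" else "nice"),
            (List.foldl (pvAKw ll (pvASec ll (if b then "must" else "nice"))) (m, n) keywords).1,
            (List.foldl (pvAKw ll (pvASec ll (if b then "must" else "nice"))) (m, n) keywords).2) = _
      rw [hsec, pvInnerFold]
      cases pvBSec ll b <;> simp
    rw [List.foldl_cons, hstep, hlab]
    simp only [List.flatMap_cons, List.foldl_append]
    cases hb : pvBSec ll b
    · obtain ⟨b', hrec⟩ := ih false m
        (List.foldl PySem.Set.add n (keywords.filter (fun kw => PySem.Str.isIn kw ll)))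
      exact ⟨b', by simpa [pvPickMust, pvPickNice] using hrec⟩
    · obtain ⟨b', hrec⟩ := ih true
        (List.foldl PySem.Set.add m (keywords.filter (fun kw => PySem.Str.isIn kw ll))) n
      exact ⟨b', by simpa [pvPickMust, pvPickNice] using hrec⟩

-- filter commutes with first-occurrence dedup (Python set construction)
theorem pvFilterFoldlAdd {α : Type} [BEq α] [LawfulBEq α] (p : α → Bool)
    (l : List α) (s : List α) :
    List.filter p (List.foldl PySem.Set.add s l)
      = List.foldl PySem.Set.add (List.filter p s) (List.filter p l) := by
  induction l generalizing s with
  | nil => simp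
  | cons x rest ih =>
    rw [List.foldl_cons, ih, List.filter_cons]
    by_cases hp : p x = true
    · rw [if_pos hp, List.foldl_cons]
      congr 1
      simp only [PySem.Set.add]
      by_cases hx : x ∈ s
      · simp [hx, List.mem_filter, hp]
      · simp [hx, List.mem_filter, hp]
    · rw [if_neg hp]
      congr 1
      simp only [PySem.Set.add]
      by_cases hx : x ∈ s
      · simp [hx]
      · simp [hx, hp]

theorem pvOfListFilter {α : Type} [BEq α] [LawfulBEq α] (p : α → Bool) (l : List α) :
    PySem.Set.ofList (List.filter p l) = List.filter p (PySem.Set.ofList l) := by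
  simpa [PySem.Set.ofList, PySem.Set.empty] using (pvFilterFoldlAdd p l []).symm

-- A's 'must |= keywords - must - nice' equals B's 'must | {kw unseen on both sides}'
theorem pvTail (keywords must nice : List String) :
    PySem.Set.update must (PySem.Set.diff (PySem.Set.diff (PySem.Set.ofList keywords) must) nice)
      = PySem.Set.union must (PySem.Set.ofList (keywords.filter (fun kw =>
          !(PySem.Set.contains must kw) && !(PySem.Set.contains nice kw)))) := by
  have hXnodup : (PySem.Set.diff (PySem.Set.diff (PySem.Set.ofList keywords) must) nice).Nodup :=
    ((PySem.Set.nodup_ofList keywords).filter _).filter _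
  simp only [PySem.Set.union]
  rw [PySem.Set.update_eq_append_filter, PySem.Set.update_eq_append_filter,
      PySem.Set.ofList_eq_self_of_nodup _ hXnodup, PySem.Set.ofList_ofList, pvOfListFilter]
  congr 1
  simp only [PySem.Set.diff, List.filter_filter]
  apply List.filter_congr
  intro x _
  cases h1 : PySem.Set.contains must x <;> cases h2 : PySem.Set.contains nice x <;> simp

-- A's epilogue applied to B's two streams is exactly B's phase 2
theorem pvFinishCombine (keywords : List String) (labeled : List (String × Bool)) (S : String) :
    pvAFinish keywords (S,
      List.foldl PySem.Set.add PySem.Set.empty (labeled.flatMap (pvPickMust keywords)),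
      List.foldl PySem.Set.add PySem.Set.empty (labeled.flatMap (pvPickNice keywords)))
      = pvBCombine keywords labeled := by
  have hof : ∀ X : List String,
      List.foldl PySem.Set.add PySem.Set.empty X = PySem.Set.ofList X := fun _ => rfl
  simp only [pvAFinish, pvBCombine, hof]
  rw [pvTail]

-- ===== VERDICT (by name: the statement is the Claim_ definition above) =====
theorem classify_requirements_py_spec : Claim_equal_classify_requirements_py := by
  intro text keywords _
  unfold Spec_classify_requirements_py classify_requirements_py classify_requirements_py_alt
  obtain ⟨b', hfold⟩ := pvOuterFold keywords ((PySem.Str.split? text "\n").getD []) true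
      PySem.Set.empty PySem.Set.empty
  rw [show ((if (true : Bool) then "must" else "nice" : String)) = "must" from rfl] at hfold
  rw [hfold]
  exact pvFinishCombine keywords (pvLabelLines ((PySem.Str.split? text "\n").getD []) true) _
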